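-- pv_equiv track=rewrite | github.com/alex-stoneman/SchoolFolder | Computing/Lessons/Year13/indexTesting.py | hex_indexes
-- ===== SOURCE A (Python) =====
-- def hex_indexes(n):
--     valRange = [a for a in range(-n, n+1)]
--     hexList=[[0 for _ in range(2*n+1)] for _ in range(2*n+1)]
--     for s in valRange:
--         for q in valRange:
--             if abs(s+q) <= n:
--                 index = (s + n) * (2 * n + 1) + q + n - (n*(n+1))//2
--                 if s < 0:
--                     a = abs(s) - 1
--                     index += (a*(a+1))//2
--                 b = (abs(s-1)+s-1)//2
--                 index -= (b*(b+1))//2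
--                 hexList[s+n][q+n] = index
--             else:
--                 hexList[s + n][q + n] = -1
--     return hexList
-- ===== SOURCE B (Python) =====
-- def hex_indexes(n):
--     hexList = []
--     counter = 0
--     for s in range(-n, n + 1):
--         row = []
--         for q in range(-n, n + 1):
--             if abs(s + q) <= n:
--                 row.append(counter)
--                 counter += 1
--             else:
--                 row.append(-1)
--         hexList.append(row)
--     return hexList
-- ===== Notes on version B (the rewrite author's own statement) =====
-- stated objective: simpler
-- what changed: B drops A's closed-form index formula with its triangular-number corrections and the preallocated grid of indexed assignments; it builds each row by appending and threads a running counter that numbers the valid cells consecutively, which also avoids the per-cell division/abs arithmetic.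
import Mathlib
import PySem

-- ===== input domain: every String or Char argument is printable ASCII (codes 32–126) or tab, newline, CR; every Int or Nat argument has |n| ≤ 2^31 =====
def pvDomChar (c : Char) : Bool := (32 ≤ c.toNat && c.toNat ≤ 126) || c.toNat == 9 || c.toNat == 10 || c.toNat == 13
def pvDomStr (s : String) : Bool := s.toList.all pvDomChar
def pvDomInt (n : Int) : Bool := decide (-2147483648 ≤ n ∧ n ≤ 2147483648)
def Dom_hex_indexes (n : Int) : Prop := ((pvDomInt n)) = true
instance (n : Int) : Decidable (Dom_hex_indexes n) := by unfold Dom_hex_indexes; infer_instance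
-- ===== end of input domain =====

-- B replaces A's closed-form index formula (with triangular-number corrections) by a running
-- counter threaded through the same traversal, building each row by appending; objective: simpler.

-- ===== PORT A =====
def hex_indexes (n : Int) : List (List Int) :=
  let valRange := PySem.List.pyRange (-n) (n + 1) 1
  let hexList : List (List Int) :=
    (PySem.List.pyRange 0 (2 * n + 1) 1).map (fun _ =>
      (PySem.List.pyRange 0 (2 * n + 1) 1).map (fun _ => (0 : Int)))
  valRange.foldl (fun hexList s =>
    valRange.foldl (fun hexList q =>
      if |s + q| ≤ n then
        let index := (s + n) * (2 * n + 1) + q + n - PySem.Int.floordiv (n * (n + 1)) 2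
        let index := if s < 0 then
            let a := |s| - 1
            index + PySem.Int.floordiv (a * (a + 1)) 2
          else index
        let b := PySem.Int.floordiv (|s - 1| + s - 1) 2
        let index := index - PySem.Int.floordiv (b * (b + 1)) 2
        PySem.List.pySetD hexList (s + n)
          (PySem.List.pySetD (PySem.List.pyGetD hexList (s + n) []) (q + n) index)
      else
        PySem.List.pySetD hexList (s + n)
          (PySem.List.pySetD (PySem.List.pyGetD hexList (s + n) []) (q + n) (-1)))
      hexList) hexList

-- ===== PORT B =====
def hex_indexes_alt (n : Int) : List (List Int) :=
  ((PySem.List.pyRange (-n) (n + 1) 1).foldl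
    (fun (st : List (List Int) × Int) s =>
      let rc := (PySem.List.pyRange (-n) (n + 1) 1).foldl
        (fun (rc : List Int × Int) q =>
          if |s + q| ≤ n then (rc.1 ++ [rc.2], rc.2 + 1) else (rc.1 ++ [-1], rc.2))
        (([] : List Int), st.2)
      (st.1 ++ [rc.1], rc.2))
    (([] : List (List Int)), (0 : Int))).1

-- ===== PRECONDITION & SPEC =====
def Spec_hex_indexes (n : Int) (out : List (List Int)) : Prop := out = hex_indexes_alt n
instance (n : Int) (out : List (List Int)) : Decidable (Spec_hex_indexes n out) := by unfold Spec_hex_indexes; infer_instance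

-- ===== CLAIM (what is proved, stated in full; the proofs are below) =====
def Claim_equal_hex_indexes : Prop := ∀ (n : Int), Dom_hex_indexes n → Spec_hex_indexes n (hex_indexes n)

-- ===== LEMMAS AND PROOFS =====

-- A's closed-form index of a valid cell, and the cell value (index, or -1 when invalid).
def idxA (n s q : Int) : Int :=
  (if s < 0 then
      (s + n) * (2 * n + 1) + q + n - PySem.Int.floordiv (n * (n + 1)) 2
        + PySem.Int.floordiv ((|s| - 1) * ((|s| - 1) + 1)) 2
    else (s + n) * (2 * n + 1) + q + n - PySem.Int.floordiv (n * (n + 1)) 2)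
  - PySem.Int.floordiv
      ((PySem.Int.floordiv (|s - 1| + s - 1) 2) * ((PySem.Int.floordiv (|s - 1| + s - 1) 2) + 1)) 2

def cellA (n s q : Int) : Int := if |s + q| ≤ n then idxA n s q else -1

def specGrid (n : Int) : List (List Int) :=
  (PySem.List.pyRange (-n) (n + 1) 1).map (fun s =>
    (PySem.List.pyRange (-n) (n + 1) 1).map (fun q => cellA n s q))

-- the running counter of B when it is about to process cell (s, a)
def cnt (n s a : Int) : Int := idxA n s (min (max a (-n - s)) (n - s + 1))

lemma tri_div2 (k : Int) : (k * (k + 1)) / 2 * 2 = k * (k + 1) :=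
  Int.ediv_mul_cancel (Int.even_mul_succ_self k).two_dvd

lemma idxA_shift (n s q q' : Int) : idxA n s q' = idxA n s q + (q' - q) := by
  unfold idxA; split_ifs <;> ring

lemma cnt_valid (n s a : Int) (h1 : -n - s ≤ a) (h2 : a ≤ n - s) : cnt n s a = idxA n s a := by
  unfold cnt; congr 1; omega

lemma cnt_valid_succ (n s a : Int) (h1 : -n - s ≤ a) (h2 : a ≤ n - s) :
    cnt n s (a + 1) = idxA n s a + 1 := by
  unfold cnt
  rw [show min (max (a + 1) (-n - s)) (n - s + 1) = a + 1 by omega, idxA_shift n s a (a + 1)]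
  ring

lemma cnt_invalid (n s a : Int) (h : a < -n - s ∨ n - s < a) : cnt n s (a + 1) = cnt n s a := by
  unfold cnt; congr 1; omega

lemma hfd : ∀ a : Int, PySem.Int.floordiv a 2 = a / 2 := fun a =>
  PySem.Int.floordiv_eq_ediv_of_pos (by norm_num)

lemma cnt_base (n : Int) (hn : 0 ≤ n) : cnt n (-n) (-n) = 0 := by
  unfold cnt
  rw [show min (max (-n) (-n - -n)) (n - -n + 1) = 0 by omega]
  unfold idxA
  simp only [hfd]
  rcases lt_or_ge (-n) 0 with h | h
  · rw [if_pos h, abs_of_neg h, abs_of_neg (show -n - 1 < 0 by omega)]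
    rw [show -(-n - 1) + -n - 1 = 0 by ring]
    norm_num
    refine mul_left_cancel₀ (a := (2:Int)) two_ne_zero ?_
    have h1 := tri_div2 n
    have h2 := tri_div2 (-(-n) - 1)
    ring_nf
    ring_nf at h1 h2
    linarith [h1, h2]
  · have hn0 : n = 0 := by omega
    subst hn0; decide

lemma half_mul (x y : Int) (h : x = y * (y + 1)) : x / 2 * 2 = x := by
  rw [h]; exact tri_div2 y

lemma cnt_row (n s : Int) (hn : 0 ≤ n) (hs1 : -n ≤ s) (hs2 : s < n) :
    cnt n s (n + 1) = cnt n (s + 1) (-n) := by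
  unfold cnt
  rcases lt_or_ge s 0 with hs | hs
  · rw [show min (max (n + 1) (-n - s)) (n - s + 1) = n + 1 by omega,
      show min (max (-n) (-n - (s + 1))) (n - (s + 1) + 1) = -n - s - 1 by omega]
    unfold idxA
    simp only [hfd]
    rw [if_pos hs, abs_of_neg hs, abs_of_neg (show s - 1 < 0 by omega)]
    rw [show -(s - 1) + s - 1 = (0 : Int) by ring]
    by_cases hs' : s + 1 < 0
    · rw [if_pos hs', abs_of_neg hs', abs_of_neg (show s + 1 - 1 < 0 by omega)]
      rw [show -(s + 1 - 1) + (s + 1) - 1 = (0 : Int) by ring]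
      norm_num
      linarith [half_mul (n * (n + 1)) n (by ring),
        half_mul (-((-s - 1) * s)) (-s - 1) (by ring),
        half_mul ((-1 + -s - 1) * (-1 + -s)) (-s - 2) (by ring)]
    · have hs0 : s = -1 := by omega
      subst hs0
      rw [if_neg hs']
      norm_num
      ring
  · rw [show min (max (n + 1) (-n - s)) (n - s + 1) = n - s + 1 by omega,
      show min (max (-n) (-n - (s + 1))) (n - (s + 1) + 1) = -n by omega]
    unfold idxA
    simp only [hfd]
    rw [if_neg (not_lt.mpr hs), if_neg (show ¬ s + 1 < 0 by omega),
      show s + 1 - 1 = s by ring, abs_of_nonneg hs,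
      show s + (s + 1) - 1 = s * 2 by ring, Int.mul_ediv_cancel _ two_ne_zero]
    by_cases hs1' : 1 ≤ s
    · rw [abs_of_nonneg (show (0 : Int) ≤ s - 1 by omega),
        show s - 1 + s - 1 = (s - 1) * 2 by ring, Int.mul_ediv_cancel _ two_ne_zero]
      linarith [tri_div2 n, tri_div2 (s - 1), tri_div2 s]
    · have hs0 : s = 0 := by omega
      subst hs0
      norm_num
      linarith [tri_div2 n]

-- ===== A equals the spec grid =====

lemma getD_append_of_eq {α : Type} (l1 l2 : List α) (d : α) (m : Nat) (hm : m = l1.length) :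
    (l1 ++ l2).getD m d = l2.getD 0 d := by
  subst hm
  induction l1 with
  | nil => rfl
  | cons x t ih => simpa only [List.cons_append, List.length_cons, List.getD_cons_succ] using ih

lemma set_append_of_eq {α : Type} (l1 l2 : List α) (a : α) (m : Nat) (hm : m = l1.length) :
    (l1 ++ l2).set m a = l1 ++ l2.set 0 a := by
  subst hm
  induction l1 with
  | nil => rfl
  | cons x t ih =>
    simp only [List.cons_append, List.length_cons, List.set_cons_succ]
    rw [ih]

-- fold of in-order writes over range m turns any long-enough list into the written prefix
lemma foldl_set_range {α : Type} (h : Nat → α) :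
    ∀ (m : Nat) (xs : List α), m ≤ xs.length →
      (List.range m).foldl (fun acc k => acc.set k (h k)) xs
        = (List.range m).map h ++ xs.drop m := by
  intro m
  induction m with
  | zero => simp
  | succ m ih =>
    intro xs hm
    have hlt : m < xs.length := by omega
    rw [List.range_succ, List.foldl_append, ih xs (by omega), List.foldl_cons, List.foldl_nil,
      List.drop_eq_getElem_cons hlt, set_append_of_eq _ _ _ _ (by simp), List.set_cons_zero,
      List.map_append, List.append_assoc]
    simp

-- a write whose value is read from the written slot collapses to one write of the inner fold
lemma set_foldl_collapse {α β : Type} (F : List α → β → List α) (k : Nat) :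
    ∀ (ys : List β) (g : List (List α)),
      ys.foldl (fun g q => g.set k (F (g.getD k []) q)) g
        = g.set k (ys.foldl F (g.getD k [])) := by
  intro ys
  induction ys with
  | nil =>
    intro g
    by_cases hk : k < g.length
    · simp [List.getD_eq_getElem?_getD, List.getElem?_eq_getElem hk, List.set_getElem_self]
    · rw [List.set_eq_of_length_le (by omega)]; rfl
  | cons y ys ih =>
    intro g
    rw [List.foldl_cons, List.foldl_cons, ih]
    by_cases hk : k < g.length
    · have h1 : (g.set k (F (g.getD k []) y)).getD k [] = F (g.getD k []) y := by
        rw [List.getD_eq_getElem?_getD, List.getElem?_set_self (by simpa using hk)]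
        rfl
      rw [h1, List.set_set]
    · have hk' : g.length ≤ k := by omega
      rw [List.set_eq_of_length_le (by simpa using hk'), List.set_eq_of_length_le hk',
        List.set_eq_of_length_le hk']

lemma outer_fold {α : Type} (G : Nat → List α → List α) (h : Nat → List α) (L : Nat)
    (HG : ∀ k r, r.length = L → G k r = h k) :
    ∀ (m : Nat) (xs : List (List α)), m ≤ xs.length → (∀ r ∈ xs, r.length = L) →
      (List.range m).foldl (fun acc k => acc.set k (G k (acc.getD k []))) xs
        = (List.range m).map h ++ xs.drop m := by
  intro m
  induction m with
  | zero => simp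
  | succ m ih =>
    intro xs hm hall
    have hlt : m < xs.length := by omega
    rw [List.range_succ, List.foldl_append, ih xs (by omega) hall, List.foldl_cons, List.foldl_nil,
      List.drop_eq_getElem_cons hlt, getD_append_of_eq _ _ _ _ (by simp), List.getD_cons_zero,
      HG m xs[m] (hall _ (List.getElem_mem hlt)), set_append_of_eq _ _ _ _ (by simp),
      List.set_cons_zero, List.map_append, List.append_assoc]
    simp

lemma A_eq_spec (n : Int) : hex_indexes n = specGrid n := by
  by_cases hn : 0 ≤ n
  · have hbody : ∀ (g : List (List Int)) (s q : Int),
        (if |s + q| ≤ n then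
          PySem.List.pySetD g (s + n)
            (PySem.List.pySetD (PySem.List.pyGetD g (s + n) []) (q + n)
              ((if s < 0 then
                  (s + n) * (2 * n + 1) + q + n - PySem.Int.floordiv (n * (n + 1)) 2
                    + PySem.Int.floordiv ((|s| - 1) * ((|s| - 1) + 1)) 2
                else (s + n) * (2 * n + 1) + q + n - PySem.Int.floordiv (n * (n + 1)) 2)
              - PySem.Int.floordiv
                  ((PySem.Int.floordiv (|s - 1| + s - 1) 2) *
                    ((PySem.Int.floordiv (|s - 1| + s - 1) 2) + 1)) 2))
        else
          PySem.List.pySetD g (s + n)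
            (PySem.List.pySetD (PySem.List.pyGetD g (s + n) []) (q + n) (-1)))
        = PySem.List.pySetD g (s + n)
            (PySem.List.pySetD (PySem.List.pyGetD g (s + n) []) (q + n) (cellA n s q)) := by
      intro g s q
      unfold cellA idxA
      split_ifs <;> rfl
    have hr : PySem.List.pyRange (-n) (n + 1) 1
        = (List.range (2 * n + 1).toNat).map (fun (k : Nat) => -n + (k : Int)) := by
      apply List.ext_getElem
      · simp [PySem.List.length_pyRange_one]
        omega
      · intro i h1 h2
        simp [PySem.List.getElem_pyRange_one]
    have hidx : ∀ (k : Nat), -n + (k : Int) + n = (k : Int) := fun k => by ring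
    have hcol : ∀ (g : List (List Int)) (k : Nat),
        (List.range (2 * n + 1).toNat).foldl
          (fun g j => g.set k ((g.getD k []).set j (cellA n (-n + (k : Int)) (-n + (j : Int))))) g
          = g.set k ((List.range (2 * n + 1).toNat).foldl
              (fun r j => r.set j (cellA n (-n + (k : Int)) (-n + (j : Int)))) (g.getD k [])) :=
      fun g k => set_foldl_collapse
        (fun r j => r.set j (cellA n (-n + (k : Int)) (-n + (j : Int)))) k _ g
    simp only [hex_indexes]
    simp only [hbody, hr, List.foldl_map]
    simp only [hidx, PySem.List.pySetD_natCast]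
    have hget : ∀ (xs : List (List Int)) (k : Nat), PySem.List.pyGetD xs (k : Int) [] = xs.getD k [] := by
      intro xs k
      simp only [PySem.List.pyGetD, PySem.List.pyGet?, PySem.List.pyIdx?, List.getD_eq_getElem?_getD]
      by_cases h : k < xs.length
      · simp [h]
      · simp [List.getElem?_eq_none (show xs.length ≤ k by omega), h]
    simp only [hget, hcol]
    have hm : (PySem.List.pyRange 0 (2 * n + 1) 1).length = (2 * n + 1).toNat := by
      rw [PySem.List.length_pyRange_one]
      omega
    rw [outer_fold
      (fun k r => (List.range (2 * n + 1).toNat).foldl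
        (fun r j => r.set j (cellA n (-n + (k : Int)) (-n + (j : Int)))) r)
      (fun k => (List.range (2 * n + 1).toNat).map (fun (j : Nat) => cellA n (-n + (k : Int)) (-n + (j : Int))))
      ((2 * n + 1).toNat)
      (fun k r hrl => by
        beta_reduce
        rw [foldl_set_range _ ((2 * n + 1).toNat) r (le_of_eq hrl.symm),
          List.drop_eq_nil_of_le (le_of_eq hrl), List.append_nil])
      ((2 * n + 1).toNat) _ (by simp [hm]) (by
        intro r hrmem
        simp only [List.mem_map] at hrmem
        obtain ⟨x, _, hx⟩ := hrmem
        rw [← hx]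
        simp [hm])]
    rw [List.drop_eq_nil_of_le (by simp [hm]), List.append_nil]
    simp [specGrid, hr, List.map_map, Function.comp]
  · have h1 : PySem.List.pyRange (-n) (n + 1) 1 = [] := PySem.List.pyRange_one_eq_nil (by omega)
    have h2 : PySem.List.pyRange 0 (2 * n + 1) 1 = [] := PySem.List.pyRange_one_eq_nil (by omega)
    simp [hex_indexes, specGrid, h1, h2]

-- ===== B equals the spec grid =====

lemma inner_char (n s : Int) :
    ∀ (k : Nat) (a : Int), a = n + 1 - (k : Int) → -n ≤ a → ∀ (r : List Int),
      (PySem.List.pyRange a (n + 1) 1).foldl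
        (fun (rc : List Int × Int) q =>
          if |s + q| ≤ n then (rc.1 ++ [rc.2], rc.2 + 1) else (rc.1 ++ [-1], rc.2))
        (r, cnt n s a)
      = (r ++ (PySem.List.pyRange a (n + 1) 1).map (fun q => cellA n s q), cnt n s (n + 1)) := by
  intro k
  induction k with
  | zero =>
    intro a ha _ r
    have he : PySem.List.pyRange a (n + 1) 1 = [] := PySem.List.pyRange_one_eq_nil (by omega)
    simp [ha]
  | succ k ih =>
    intro a ha han r
    have hlt : a < n + 1 := by push_cast at ha; omega
    rw [PySem.List.pyRange_one_cons hlt, List.foldl_cons, List.map_cons]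
    by_cases hv : |s + a| ≤ n
    · have hb := abs_le.mp hv
      have h1 : -n - s ≤ a := by omega
      have h2 : a ≤ n - s := by omega
      simp only [if_pos hv]
      rw [cnt_valid n s a h1 h2,
        show idxA n s a + 1 = cnt n s (a + 1) from (cnt_valid_succ n s a h1 h2).symm,
        ih (a + 1) (by push_cast at ha ⊢; omega) (by omega) (r ++ [idxA n s a])]
      simp [cellA, hv, List.append_assoc]
    · have h3 : a < -n - s ∨ n - s < a := by
        have : ¬(-n ≤ s + a ∧ s + a ≤ n) := fun hc => hv (abs_le.mpr hc)
        omega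
      simp only [if_neg hv]
      rw [show cnt n s a = cnt n s (a + 1) from (cnt_invalid n s a h3).symm,
        ih (a + 1) (by push_cast at ha ⊢; omega) (by omega) (r ++ [-1])]
      simp [cellA, hv, List.append_assoc]

lemma outer_char (n : Int) (hn : 0 ≤ n) :
    ∀ (k : Nat) (s : Int), s = n + 1 - (k : Int) → -n ≤ s →
      ∀ (acc : List (List Int)) (c : Int), (s ≤ n → c = cnt n s (-n)) →
      ((PySem.List.pyRange s (n + 1) 1).foldl
        (fun (st : List (List Int) × Int) s =>
          let rc := (PySem.List.pyRange (-n) (n + 1) 1).foldl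
            (fun (rc : List Int × Int) q =>
              if |s + q| ≤ n then (rc.1 ++ [rc.2], rc.2 + 1) else (rc.1 ++ [-1], rc.2))
            (([] : List Int), st.2)
          (st.1 ++ [rc.1], rc.2))
        (acc, c)).1
      = acc ++ (PySem.List.pyRange s (n + 1) 1).map (fun s' =>
          (PySem.List.pyRange (-n) (n + 1) 1).map (fun q => cellA n s' q)) := by
  intro k
  induction k with
  | zero =>
    intro s hs _ acc c _
    have he : PySem.List.pyRange s (n + 1) 1 = [] := PySem.List.pyRange_one_eq_nil (by omega)
    simp [he]
  | succ k ih =>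
    intro s hs hsn acc c hc
    have hsle : s ≤ n := by push_cast at hs; omega
    have hc' := hc hsle
    subst hc'
    rw [PySem.List.pyRange_one_cons (show s < n + 1 by omega), List.foldl_cons, List.map_cons]
    have hinner := inner_char n s ((2 * n + 1).toNat) (-n)
      (by omega) (le_refl _) ([] : List Int)
    simp only [hinner]
    rw [ih (s + 1) (by push_cast at hs ⊢; omega) (by omega) _ _
      (fun _ => cnt_row n s hn hsn (by omega))]
    simp [List.append_assoc]

lemma B_eq_spec (n : Int) : hex_indexes_alt n = specGrid n := by
  by_cases hn : 0 ≤ n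
  · unfold hex_indexes_alt
    rw [outer_char n hn ((2 * n + 1).toNat) (-n) (by omega) (le_refl _)
      [] 0 (fun _ => (cnt_base n hn).symm)]
    simp [specGrid]
  · have he : PySem.List.pyRange (-n) (n + 1) 1 = [] := PySem.List.pyRange_one_eq_nil (by omega)
    simp [hex_indexes_alt, specGrid, he]

-- ===== VERDICT (by name: the statement is the Claim_ definition above) =====
theorem hex_indexes_spec : Claim_equal_hex_indexes := by
  intro n _
  unfold Spec_hex_indexes
  rw [A_eq_spec, B_eq_spec]
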